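-- pv_equiv track=rewrite | github.com/xKosinus/PriMut | primer_windows.py | merge_close_mutations
-- ===== SOURCE A (Python) =====
-- def merge_close_mutations(mutations, max_distance_nt=21):
--     sorted_muts = sorted(mutations, key=lambda x: x[1])
--     if not sorted_muts:
--         return []
--
--     merged = []
--     current_group = [sorted_muts[0]]
--
--     for mut in sorted_muts[1:]:
--         last_position = current_group[-1][1]
--         if (mut[1] - last_position) * 3 <= max_distance_nt:
--             current_group.append(mut)
--         else:
--             merged.append(current_group)
--             current_group = [mut]
--     merged.append(current_group)
--     return merged
-- ===== SOURCE B (Python) =====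
-- def merge_close_mutations(mutations, max_distance_nt=21):
--     s = sorted(mutations, key=lambda x: x[1])
--     if not s:
--         return []
--     breaks = [i for i in range(1, len(s))
--               if (s[i][1] - s[i - 1][1]) * 3 > max_distance_nt]
--     bounds = [0] + breaks + [len(s)]
--     return [s[a:b] for a, b in zip(bounds, bounds[1:])]
-- ===== Notes on version B (the rewrite author's own statement) =====
-- stated objective: alternative
-- what changed: Instead of growing one group at a time with a running accumulator, B first computes the table of break indices (where the consecutive gap exceeds the threshold) over the sorted list and then partitions the list by slicing between consecutive boundary indices.
import Mathlib
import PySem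

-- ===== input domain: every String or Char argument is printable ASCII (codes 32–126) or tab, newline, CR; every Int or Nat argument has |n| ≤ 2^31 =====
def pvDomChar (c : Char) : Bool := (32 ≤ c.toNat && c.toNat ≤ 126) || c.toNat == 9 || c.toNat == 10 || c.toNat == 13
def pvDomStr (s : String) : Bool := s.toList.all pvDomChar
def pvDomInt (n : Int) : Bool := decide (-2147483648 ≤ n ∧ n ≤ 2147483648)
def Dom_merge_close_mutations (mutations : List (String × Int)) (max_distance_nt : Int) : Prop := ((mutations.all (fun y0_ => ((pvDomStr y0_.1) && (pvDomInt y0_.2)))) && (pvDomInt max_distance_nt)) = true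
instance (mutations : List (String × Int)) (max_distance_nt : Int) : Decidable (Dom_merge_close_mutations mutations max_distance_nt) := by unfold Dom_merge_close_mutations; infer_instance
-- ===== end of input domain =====

-- B replaces A's accumulator loop by a boundary table: it first computes the break
-- indices over the sorted list, then partitions the list by slicing between
-- consecutive boundaries (objective: alternative decomposition, same cost).


-- ===== PORT A =====
def merge_close_mutations (mutations : List (String × Int)) (max_distance_nt : Int) : List (List (String × Int)) :=
  let sorted_muts := PySem.List.sorted mutations (fun x => x.2)
  match sorted_muts with
  | [] => []
  | m0 :: rest =>
    -- merged / current_group accumulator loop over sorted_muts[1:]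
    let st := rest.foldl
      (fun (st : List (List (String × Int)) × List (String × Int)) mu =>
        let last_position := ((PySem.List.pyGet? st.2 (-1)).getD ("", 0)).2
        if (mu.2 - last_position) * 3 ≤ max_distance_nt then (st.1, st.2 ++ [mu])
        else (st.1 ++ [st.2], [mu]))
      ([], [m0])
    st.1 ++ [st.2]

-- ===== PORT B =====
def merge_close_mutations_alt (mutations : List (String × Int)) (max_distance_nt : Int) : List (List (String × Int)) :=
  let s := PySem.List.sorted mutations (fun x => x.2)
  if s.isEmpty then []
  else
    let breaks := (PySem.List.pyRange 1 (s.length : Int) 1).filter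
      (fun i => decide ((((PySem.List.pyGet? s i).getD ("", 0)).2
                        - ((PySem.List.pyGet? s (i - 1)).getD ("", 0)).2) * 3 > max_distance_nt))
    let bounds := (0 : Int) :: (breaks ++ [(s.length : Int)])
    (bounds.zip bounds.tail).map (fun ab => PySem.List.slice s (some ab.1) (some ab.2))

-- ===== PRECONDITION & SPEC =====
def Spec_merge_close_mutations (mutations : List (String × Int)) (max_distance_nt : Int) (out : List (List (String × Int))) : Prop := out = merge_close_mutations_alt mutations max_distance_nt
instance (mutations : List (String × Int)) (max_distance_nt : Int) (out : List (List (String × Int))) : Decidable (Spec_merge_close_mutations mutations max_distance_nt out) := by unfold Spec_merge_close_mutations; infer_instance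

-- ===== CLAIM (what is proved, stated in full; the proofs are below) =====
def Claim_equal_merge_close_mutations : Prop := ∀ (mutations : List (String × Int)) (max_distance_nt : Int), Dom_merge_close_mutations mutations max_distance_nt → Spec_merge_close_mutations mutations max_distance_nt (merge_close_mutations mutations max_distance_nt)

-- ===== LEMMAS AND PROOFS =====

-- the common grouping both programs compute on the sorted list (proof device)
def grp (d : Int) : (String × Int) → List (String × Int) → List (List (String × Int))
  | a, [] => [[a]]
  | a, b :: t =>
    match grp d b t with
    | [] => [[a]]
    | g :: gs => if (b.2 - a.2) * 3 ≤ d then (a :: g) :: gs else [a] :: g :: gs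

lemma grp_ne_nil (d : Int) (a : String × Int) (t : List (String × Int)) : grp d a t ≠ [] := by
  cases t with
  | nil => simp [grp]
  | cons b u =>
    simp only [grp]
    rcases h : grp d b u with _ | ⟨g, gs⟩ <;> simp
    split <;> simp

-- A's loop, generalized: state (merged, pre ++ [a]) — proved by induction on the tail
lemma A_loop (d : Int) : ∀ (t : List (String × Int)) (merged : List (List (String × Int)))
    (pre : List (String × Int)) (a : String × Int),
    (t.foldl
      (fun (st : List (List (String × Int)) × List (String × Int)) mu =>
        let last_position := ((PySem.List.pyGet? st.2 (-1)).getD ("", 0)).2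
        if (mu.2 - last_position) * 3 ≤ d then (st.1, st.2 ++ [mu])
        else (st.1 ++ [st.2], [mu]))
      (merged, pre ++ [a])).1
    ++ [(t.foldl
      (fun (st : List (List (String × Int)) × List (String × Int)) mu =>
        let last_position := ((PySem.List.pyGet? st.2 (-1)).getD ("", 0)).2
        if (mu.2 - last_position) * 3 ≤ d then (st.1, st.2 ++ [mu])
        else (st.1 ++ [st.2], [mu]))
      (merged, pre ++ [a])).2]
    = merged ++ ((pre ++ (grp d a t).headI) :: (grp d a t).tail) := by
  intro t
  induction t with
  | nil => intro merged pre a; simp [grp]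
  | cons b u ih =>
    intro merged pre a
    rcases h : grp d b u with _ | ⟨g, gs⟩
    · exact absurd h (grp_ne_nil d b u)
    · simp only [List.foldl_cons, PySem.List.pyGet?_neg_one_append_singleton, Option.getD_some, grp, h]
      by_cases hc : (b.2 - a.2) * 3 ≤ d
      · rw [if_pos hc]
        have := ih merged (pre ++ [a]) b
        simp only [h] at this
        rw [show (pre ++ [a]) ++ [b] = (pre ++ [a]) ++ [b] from rfl] at this
        simpa [hc, List.append_assoc] using this
      · rw [if_neg hc]
        have := ih (merged ++ [pre ++ [a]]) [] b
        simp only [h, List.nil_append] at this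
        simpa [hc, List.append_assoc] using this

lemma A_eq_grp (d : Int) (m0 : String × Int) (rest : List (String × Int)) :
    (let st := rest.foldl
      (fun (st : List (List (String × Int)) × List (String × Int)) mu =>
        let last_position := ((PySem.List.pyGet? st.2 (-1)).getD ("", 0)).2
        if (mu.2 - last_position) * 3 ≤ d then (st.1, st.2 ++ [mu])
        else (st.1 ++ [st.2], [mu]))
      ([], [m0])
     st.1 ++ [st.2]) = grp d m0 rest := by
  have := A_loop d rest [] [] m0
  rcases h : grp d m0 rest with _ | ⟨g, gs⟩
  · exact absurd h (grp_ne_nil d m0 rest)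
  · simp only [h, List.nil_append] at this ⊢
    simpa using this

-- B-side helpers: consecutive pairs of a boundary list, the break predicate/table
def cuts : Int → List Int → List (Int × Int)
  | _, [] => []
  | x, y :: ys => (x, y) :: cuts y ys

def bp (d : Int) (s : List (String × Int)) (i : Int) : Bool :=
  decide ((((PySem.List.pyGet? s i).getD ("", 0)).2
           - ((PySem.List.pyGet? s (i - 1)).getD ("", 0)).2) * 3 > d)

def brk (d : Int) (s : List (String × Int)) : List Int :=
  (PySem.List.pyRange 1 (s.length : Int) 1).filter (bp d s)

def Bbody (d : Int) (s : List (String × Int)) : List (List (String × Int)) :=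
  ((0 :: (brk d s ++ [(s.length : Int)])).zip (brk d s ++ [(s.length : Int)])).map
    (fun ab => PySem.List.slice s (some ab.1) (some ab.2))

lemma alt_def (mutations : List (String × Int)) (d : Int) :
    merge_close_mutations_alt mutations d =
      (let s := PySem.List.sorted mutations (fun x => x.2);
       if s.isEmpty then [] else Bbody d s) := rfl

lemma zip_tail_eq_cuts : ∀ (L : List Int) (x : Int), (x :: L).zip L = cuts x L := by
  intro L
  induction L with
  | nil => intro x; simp [cuts]
  | cons y ys ih => intro x; simp [cuts, List.zip_cons_cons, ih]

lemma Bbody_cuts (d : Int) (s : List (String × Int)) :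
    Bbody d s = (cuts 0 (brk d s ++ [(s.length : Int)])).map
      (fun ab => PySem.List.slice s (some ab.1) (some ab.2)) := by
  rw [Bbody, zip_tail_eq_cuts]

lemma cuts_shift : ∀ (L : List Int) (x : Int),
    cuts (x + 1) (L.map (· + 1)) = (cuts x L).map (fun ab => (ab.1 + 1, ab.2 + 1)) := by
  intro L
  induction L with
  | nil => intro x; simp [cuts]
  | cons y ys ih => intro x; simp [cuts, ih]

lemma cuts_mem : ∀ (L : List Int) (x : Int) (ab : Int × Int),
    ab ∈ cuts x L → (ab.1 = x ∨ ab.1 ∈ L) ∧ ab.2 ∈ L := by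
  intro L
  induction L with
  | nil => intro x ab h; simp [cuts] at h
  | cons y ys ih =>
    intro x ab h
    simp only [cuts, List.mem_cons] at h
    rcases h with h | h
    · subst h; simp
    · rcases ih y ab h with ⟨h1, h2⟩
      refine ⟨?_, by simp [h2]⟩
      rcases h1 with h1 | h1 <;> simp [h1]

lemma brk_pos (d : Int) (s : List (String × Int)) : ∀ y ∈ brk d s, 1 ≤ y := by
  intro y hy
  have := List.mem_of_mem_filter hy
  exact (PySem.List.mem_pyRange_one.mp this).1

lemma brk_nil (d : Int) (a : String × Int) : brk d [a] = [] := by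
  simp [brk, PySem.List.pyRange_one_eq_nil]

lemma pyGet?_cons_of_pos (x : String × Int) (xs : List (String × Int)) (i : Int) (h : 1 ≤ i) :
    PySem.List.pyGet? (x :: xs) i = PySem.List.pyGet? xs (i - 1) := by
  have hi : i = ((i - 1).toNat : Int) + 1 := by omega
  rw [hi, PySem.List.pyGet?_cons_succ]
  congr 1
  omega

lemma bp_one (d : Int) (a b : String × Int) (u : List (String × Int)) :
    bp d (a :: b :: u) 1 = decide ((b.2 - a.2) * 3 > d) := by
  unfold bp
  rw [pyGet?_cons_of_pos _ _ 1 le_rfl]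
  have h0 : (1 : Int) - 1 = 0 := by ring
  rw [h0, PySem.List.pyGet?_zero_cons, PySem.List.pyGet?_zero_cons]
  simp

lemma bp_shift (d : Int) (a : String × Int) (r : List (String × Int)) (j : Int) (hj : 1 ≤ j) :
    bp d (a :: r) (j + 1) = bp d r j := by
  unfold bp
  rw [pyGet?_cons_of_pos _ _ (j + 1) (by omega)]
  have h1 : j + 1 - 1 = j := by ring
  rw [h1, pyGet?_cons_of_pos _ _ j hj]

lemma pyRange_shift (n : Int) :
    PySem.List.pyRange 2 (n + 1) 1 = (PySem.List.pyRange 1 n 1).map (· + 1) := by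
  rw [PySem.List.pyRange_one, PySem.List.pyRange_one, List.map_map]
  have h : (n + 1 - 2).toNat = (n - 1).toNat := by omega
  rw [h]
  apply List.map_congr_left
  intro k _
  simp
  ring

lemma brk_cons (d : Int) (a b : String × Int) (u : List (String × Int)) :
    brk d (a :: b :: u) =
      (if (b.2 - a.2) * 3 > d then [(1 : Int)] else []) ++ (brk d (b :: u)).map (· + 1) := by
  unfold brk
  have hlen : (((a :: b :: u).length : Nat) : Int) = (((b :: u).length : Nat) : Int) + 1 := by
    simp [List.length_cons]
  rw [hlen]
  rw [PySem.List.pyRange_one_cons (by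
    have : 1 ≤ (b :: u).length := Nat.succ_le_of_lt (List.length_pos_of_ne_nil (by simp))
    omega)]
  have h12 : (1 : Int) + 1 = 2 := by norm_num
  rw [h12, pyRange_shift, List.filter_cons, List.filter_map]
  have h2 : (PySem.List.pyRange 1 ((b :: u).length : Int) 1).filter (bp d (a :: b :: u) ∘ (· + 1))
      = (PySem.List.pyRange 1 ((b :: u).length : Int) 1).filter (bp d (b :: u)) := by
    apply List.filter_congr
    intro j hj
    have hj1 : 1 ≤ j := (PySem.List.mem_pyRange_one.mp hj).1
    simp only [Function.comp_apply]
    exact bp_shift d a (b :: u) j hj1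
  rw [h2, bp_one]
  by_cases hc : (b.2 - a.2) * 3 > d <;> simp [hc]

lemma slice_cons_shift (a : String × Int) (r : List (String × Int)) (x y : Int)
    (hx : 0 ≤ x) (hy : 0 ≤ y) :
    PySem.List.slice (a :: r) (some (x + 1)) (some (y + 1)) = PySem.List.slice r (some x) (some y) := by
  rw [PySem.List.slice_toNat _ (by omega) (by omega), PySem.List.slice_toNat _ hx hy]
  have h1 : (x + 1).toNat = x.toNat + 1 := by omega
  have h2 : (y + 1).toNat = y.toNat + 1 := by omega
  rw [h1, h2]
  simp [List.drop_succ_cons]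

lemma slice_cons_zero (a : String × Int) (r : List (String × Int)) (y : Int) (hy : 0 ≤ y) :
    PySem.List.slice (a :: r) (some 0) (some (y + 1)) = a :: PySem.List.slice r (some 0) (some y) := by
  rw [PySem.List.slice_toNat _ (by omega) (by omega), PySem.List.slice_toNat _ (by omega) hy]
  have h2 : (y + 1).toNat = y.toNat + 1 := by omega
  rw [h2]
  simp

lemma grp_cons_far (d : Int) (a b : String × Int) (t : List (String × Int))
    (hc : ¬ (b.2 - a.2) * 3 ≤ d) : grp d a (b :: t) = [a] :: grp d b t := by
  rcases hg : grp d b t with _ | ⟨g, gs⟩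
  · exact absurd hg (grp_ne_nil d b t)
  · simp [grp, hg, hc]

lemma grp_cons_close (d : Int) (a b : String × Int) (t : List (String × Int))
    (hc : (b.2 - a.2) * 3 ≤ d) :
    grp d a (b :: t) = (a :: (grp d b t).headI) :: (grp d b t).tail := by
  rcases hg : grp d b t with _ | ⟨g, gs⟩
  · exact absurd hg (grp_ne_nil d b t)
  · simp [grp, hg, hc]

lemma Bbody_eq_grp (d : Int) : ∀ (t : List (String × Int)) (a : String × Int),
    Bbody d (a :: t) = grp d a t := by
  intro t
  induction t with
  | nil =>
    intro a
    rw [Bbody_cuts, brk_nil]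
    have h1 : (([a] : List (String × Int)).length : Int) = 0 + 1 := by simp
    simp only [List.nil_append, h1, cuts, List.map_cons, List.map_nil]
    rw [slice_cons_zero a [] 0 le_rfl]
    rw [PySem.List.slice_toNat _ le_rfl le_rfl]
    simp [grp]
  | cons b u ih =>
    intro a
    have hL : ∀ y ∈ brk d (b :: u) ++ [((b :: u).length : Int)], 0 ≤ y := by
      intro y hy
      rcases List.mem_append.mp hy with h | h
      · have := brk_pos d (b :: u) y h; omega
      · simp at h; omega
    have hlen : (((a :: b :: u).length : Nat) : Int) = (((b :: u).length : Nat) : Int) + 1 := by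
      simp [List.length_cons]
    rw [Bbody_cuts, brk_cons, hlen]
    by_cases hc : (b.2 - a.2) * 3 > d
    · rw [if_pos hc]
      have hre : (([(1 : Int)] ++ (brk d (b :: u)).map (· + 1)) ++ [((b :: u).length : Int) + 1])
          = 1 :: ((brk d (b :: u) ++ [((b :: u).length : Int)]).map (· + 1)) := by simp
      rw [hre]
      generalize hLdef : brk d (b :: u) ++ [((b :: u).length : Int)] = L at hL ⊢
      have hsh := cuts_shift L 0
      norm_num at hsh
      simp only [cuts, hsh, List.map_cons, List.map_map]
      have hfirst : PySem.List.slice (a :: b :: u) (some 0) (some 1) = [a] := by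
        rw [show (1 : Int) = 0 + 1 by ring, slice_cons_zero _ _ 0 le_rfl,
          PySem.List.slice_toNat _ le_rfl le_rfl]
        simp
      rw [hfirst]
      have hrest : ((cuts 0 L).map
            ((fun ab => PySem.List.slice (a :: b :: u) (some ab.1) (some ab.2)) ∘
              (fun ab => (ab.1 + 1, ab.2 + 1))))
          = (cuts 0 L).map
            (fun ab => PySem.List.slice (b :: u) (some ab.1) (some ab.2)) := by
        apply List.map_congr_left
        intro ab hab
        rcases cuts_mem _ _ _ hab with ⟨h1, h2⟩
        have hx : 0 ≤ ab.1 := by cases h1 with | inl h => omega | inr h => exact hL _ h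
        have hy : 0 ≤ ab.2 := hL _ h2
        simp only [Function.comp_apply]
        exact slice_cons_shift a (b :: u) ab.1 ab.2 hx hy
      rw [hrest, ← hLdef, ← Bbody_cuts, ih b, grp_cons_far d a b u (not_le.mpr hc)]
    · rw [if_neg hc]
      have hre : (([] ++ (brk d (b :: u)).map (· + 1)) ++ [((b :: u).length : Int) + 1])
          = (brk d (b :: u) ++ [((b :: u).length : Int)]).map (· + 1) := by simp
      rw [hre]
      rcases hLd : brk d (b :: u) ++ [((b :: u).length : Int)] with _ | ⟨c, L₂⟩
      · exact absurd hLd (by simp)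
      · have hc0 : 0 ≤ c := hL c (by rw [hLd]; exact List.mem_cons_self)
        have hL2 : ∀ y ∈ L₂, 0 ≤ y := fun y hy => hL y (by rw [hLd]; exact List.mem_cons_of_mem _ hy)
        simp only [List.map_cons, cuts]
        rw [cuts_shift L₂ c]
        simp only [List.map_map]
        rw [slice_cons_zero a (b :: u) c hc0]
        have hrest : ((cuts c L₂).map
              ((fun ab => PySem.List.slice (a :: b :: u) (some ab.1) (some ab.2)) ∘
                (fun ab => (ab.1 + 1, ab.2 + 1))))
            = (cuts c L₂).map (fun ab => PySem.List.slice (b :: u) (some ab.1) (some ab.2)) := by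
          apply List.map_congr_left
          intro ab hab
          rcases cuts_mem _ _ _ hab with ⟨h1, h2⟩
          have hx : 0 ≤ ab.1 := by cases h1 with | inl h => omega | inr h => exact hL2 _ h
          have hy : 0 ≤ ab.2 := hL2 _ h2
          simp only [Function.comp_apply]
          exact slice_cons_shift a (b :: u) ab.1 ab.2 hx hy
        rw [hrest]
        have hkey : PySem.List.slice (b :: u) (some 0) (some c) ::
              (cuts c L₂).map (fun ab => PySem.List.slice (b :: u) (some ab.1) (some ab.2))
            = grp d b u := by
          rw [← ih b, Bbody_cuts, hLd]
          simp only [cuts, List.map_cons]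
        rw [grp_cons_close d a b u (not_lt.mp hc), ← hkey]
        simp

-- ===== VERDICT (by name: the statement is the Claim_ definition above) =====
theorem merge_close_mutations_spec : Claim_equal_merge_close_mutations := by
  intro mutations d _
  unfold Spec_merge_close_mutations
  rw [alt_def]
  unfold merge_close_mutations
  rcases h : PySem.List.sorted mutations (fun x => x.2) with _ | ⟨m0, rest⟩
  · simp
  · simp only [List.isEmpty_cons, Bool.false_eq_true, if_false]
    rw [Bbody_eq_grp]
    exact A_eq_grp d m0 rest
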